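-- pv_equiv track=rewrite | github.com/Jukkilivud/base_training | task/function_tasks_2.py | one_divisior
-- ===== SOURCE A (Python) =====
-- def one_divisior(number: int) -> str:
--     count_div = []
--     for i in range(1, number+1):
--         if number % i == 0:
--             count_div.append(i)
--     if len(count_div) > 3:
--         return f"У числа {number} больше одного делителя(кроме 1 и его самого)."
--     if len(count_div) <= 3:
--         return f"У числа {number} один делитель (кроме 1 и его самого)."
-- ===== SOURCE B (Python) =====
-- def one_divisior(number: int) -> str:
--     d = 2
--     while d * d < number:
--         if number % d == 0:
--             return f"У числа {number} больше одного делителя(кроме 1 и его самого)."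
--         d += 1
--     return f"У числа {number} один делитель (кроме 1 и его самого)."
-- ===== Notes on version B (the rewrite author's own statement) =====
-- stated objective: faster
-- what changed: B replaces A's full scan over all candidates up to n that collects every divisor into a list with an early-exit trial-division loop that only searches for a proper divisor strictly below the square root of n, whose existence is equivalent to A's divisor-count threshold.
import Mathlib
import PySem

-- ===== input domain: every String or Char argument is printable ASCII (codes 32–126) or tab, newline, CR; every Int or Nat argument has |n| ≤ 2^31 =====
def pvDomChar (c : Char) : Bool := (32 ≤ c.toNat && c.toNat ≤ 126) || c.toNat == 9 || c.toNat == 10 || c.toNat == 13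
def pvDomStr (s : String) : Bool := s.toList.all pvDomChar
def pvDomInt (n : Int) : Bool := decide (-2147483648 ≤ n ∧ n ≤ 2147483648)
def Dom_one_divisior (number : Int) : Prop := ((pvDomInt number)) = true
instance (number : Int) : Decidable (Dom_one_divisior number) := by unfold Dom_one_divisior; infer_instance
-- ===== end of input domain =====

-- B replaces A's O(n) scan collecting all divisors with an O(sqrt(n)) early-exit trial
-- division looking for one divisor d with 2 ≤ d and d*d < number.

-- ===== PORT A =====
def one_divisior (number : Int) : String :=
  let count_div := (PySem.List.pyRange 1 (number + 1) 1).foldl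
    (fun acc i => if PySem.Int.mod number i == 0 then acc ++ [i] else acc) []
  if count_div.length > 3 then
    "У числа " ++ PySem.Int.toStr number ++ " больше одного делителя(кроме 1 и его самого)."
  else  -- Python's second guard 'len <= 3' is the exact complement of the first
    "У числа " ++ PySem.Int.toStr number ++ " один делитель (кроме 1 и его самого)."

-- ===== PORT B =====
-- the 'while d*d < number' loop of Source B; returns true iff an early 'return' fires
def pvAltLoop (number d : Int) : Bool :=
  if h : d * d < number then
    if PySem.Int.mod number d == 0 then true
    else pvAltLoop number (d + 1)
  else false
termination_by (number - d).toNat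
decreasing_by
  have hd : d ≤ d * d := by nlinarith [sq_nonneg d, sq_nonneg (d - 1)]
  omega

def one_divisior_alt (number : Int) : String :=
  if pvAltLoop number 2 then
    "У числа " ++ PySem.Int.toStr number ++ " больше одного делителя(кроме 1 и его самого)."
  else
    "У числа " ++ PySem.Int.toStr number ++ " один делитель (кроме 1 и его самого)."

-- ===== PRECONDITION & SPEC =====
def Spec_one_divisior (number : Int) (out : String) : Prop := out = one_divisior_alt number
instance (number : Int) (out : String) : Decidable (Spec_one_divisior number out) := by unfold Spec_one_divisior; infer_instance

-- ===== CLAIM (what is proved, stated in full; the proofs are below) =====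
def Claim_equal_one_divisior : Prop := ∀ (number : Int), Dom_one_divisior number → Spec_one_divisior number (one_divisior number)

-- ===== LEMMAS AND PROOFS =====

-- B's loop finds a divisor e ≥ d with e*e < n, if any (for d ≥ 2)
theorem pvAltLoop_iff (number d : Int) (hd : 2 ≤ d) :
    pvAltLoop number d = true ↔ ∃ e, d ≤ e ∧ e * e < number ∧ e ∣ number := by
  induction d using pvAltLoop.induct number with
  | case1 d h hmod =>
    rw [pvAltLoop]
    simp only [dif_pos h, hmod, if_true, true_iff]
    exact ⟨d, le_refl d, h, (PySem.Int.mod_eq_zero_iff_dvd number d).mp (by simpa using hmod)⟩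
  | case2 d h hmod ih =>
    rw [pvAltLoop]
    simp only [dif_pos h, hmod, Bool.false_eq_true, if_false]
    rw [ih (by omega)]
    constructor
    · rintro ⟨e, he1, he2, he3⟩; exact ⟨e, by omega, he2, he3⟩
    · rintro ⟨e, he1, he2, he3⟩
      refine ⟨e, ?_, he2, he3⟩
      rcases lt_or_eq_of_le he1 with h' | h'
      · omega
      · exfalso; apply hmod
        rw [← h'] at he3
        simp [(PySem.Int.mod_eq_zero_iff_dvd number d).mpr he3]
  | case3 d h =>
    rw [pvAltLoop]
    simp only [dif_neg h, Bool.false_eq_true, false_iff]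
    rintro ⟨e, he1, he2, he3⟩
    have : d * d ≤ e * e := by nlinarith
    omega

-- the divisor-count characterisation: A's list has length > 3 iff such a divisor exists
theorem count_gt_iff (n : Int) :
    ((PySem.List.pyRange 1 (n + 1) 1).filter (fun i => PySem.Int.mod n i == 0)).length > 3 ↔
    ∃ e, 2 ≤ e ∧ e * e < n ∧ e ∣ n := by
  set l := (PySem.List.pyRange 1 (n + 1) 1).filter (fun i => PySem.Int.mod n i == 0) with hl
  have hmem : ∀ i, i ∈ l ↔ (1 ≤ i ∧ i < n + 1 ∧ i ∣ n) := by
    intro i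
    rw [hl, List.mem_filter, PySem.List.mem_pyRange_one]
    constructor
    · rintro ⟨⟨h1, h2⟩, h3⟩
      exact ⟨h1, h2, (PySem.Int.mod_eq_zero_iff_dvd n i).mp (by simpa using h3)⟩
    · rintro ⟨h1, h2, h3⟩
      exact ⟨⟨h1, h2⟩, by simp [(PySem.Int.mod_eq_zero_iff_dvd n i).mpr h3]⟩
  have hnodup : l.Nodup := (PySem.List.nodup_pyRange_one 1 (n + 1)).filter _
  constructor
  · -- length > 3 → ∃ e : contrapositive
    intro hlen
    by_contra hP
    push Not at hP
    -- every element of l is 1, Int.sqrt n, or n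
    have hsub : ∀ i ∈ l, i ∈ ({1, Int.sqrt n, n} : Finset Int) := by
      intro i hi
      rw [hmem] at hi
      obtain ⟨h1, h2, h3⟩ := hi
      simp only [Finset.mem_insert, Finset.mem_singleton]
      by_cases hi1 : i = 1
      · exact Or.inl hi1
      by_cases hin : i = n
      · exact Or.inr (Or.inr hin)
      -- 2 ≤ i ≤ n - 1 and i ∣ n : show i * i = n
      have hi2 : 2 ≤ i := by omega
      have hii : ¬ (i * i < n) := fun hc => absurd (hP i hi2 hc) (by simp [h3])
      obtain ⟨j, hj⟩ := h3
      have hn3 : 3 ≤ n := by omega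
      have hjpos : 1 ≤ j := by nlinarith
      have hj2 : 2 ≤ j := by
        have : j ≠ 1 := fun h' => hin (by rw [hj, h', mul_one])
        omega
      have hjj : ¬ (j * j < n) := fun hc => absurd (hP j hj2 hc) (by simp; exact ⟨i, by rw [hj]; ring⟩)
      have : i = j := by nlinarith
      have hsq : i * i = n := by rw [hj, this]
      refine Or.inr (Or.inl ?_)
      rw [← hsq, Int.sqrt_eq]
      omega
    have hcard : l.length ≤ 3 := by
      have h1 : l.toFinset ⊆ ({1, Int.sqrt n, n} : Finset Int) := by
        intro i hi; exact hsub i (List.mem_toFinset.mp hi)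
      have h2 := Finset.card_le_card h1
      have h3 : ({1, Int.sqrt n, n} : Finset Int).card ≤ 3 :=
        le_trans (Finset.card_insert_le _ _) (by
          have := Finset.card_insert_le (Int.sqrt n) ({n} : Finset Int); simp at this ⊢; omega)
      rw [List.toFinset_card_of_nodup hnodup] at h2  -- name checked below
      omega
    omega
  · -- ∃ e → length > 3 : exhibit 4 distinct divisors 1, e, n/e, n
    rintro ⟨e, he2, hee, hdvd⟩
    obtain ⟨f, hf⟩ := hdvd
    have hn : 5 ≤ n := by nlinarith
    have hfpos : 1 ≤ f := by nlinarith
    have hef : e < f := by nlinarith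
    have hfn : f < n := by nlinarith
    have hmem1 : (1 : Int) ∈ l := (hmem 1).mpr ⟨le_refl 1, by omega, one_dvd n⟩
    have hmeme : e ∈ l := (hmem e).mpr ⟨by omega, by omega, ⟨f, hf⟩⟩
    have hmemf : f ∈ l := (hmem f).mpr ⟨by omega, by omega, ⟨e, by rw [hf]; ring⟩⟩
    have hmemn : n ∈ l := (hmem n).mpr ⟨by omega, by omega, dvd_refl n⟩
    have hsub : ({1, e, f, n} : Finset Int) ⊆ l.toFinset := by
      intro i hi
      simp only [Finset.mem_insert, Finset.mem_singleton] at hi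
      rcases hi with h | h | h | h <;> subst h <;> exact List.mem_toFinset.mpr (by assumption)
    have hcard4 : ({1, e, f, n} : Finset Int).card = 4 := by
      rw [Finset.card_insert_of_notMem (by simp; omega),
          Finset.card_insert_of_notMem (by simp; omega),
          Finset.card_insert_of_notMem (by simp; omega),
          Finset.card_singleton]
    have := Finset.card_le_card hsub
    rw [hcard4, List.toFinset_card_of_nodup hnodup] at this
    omega

-- ===== VERDICT (by name: the statement is the Claim_ definition above) =====
theorem one_divisior_spec : Claim_equal_one_divisior := by
  intro number _
  unfold Spec_one_divisior one_divisior one_divisior_alt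
  rw [PySem.List.foldl_append_if_eq_filter]
  simp only [List.nil_append]
  by_cases hP : ∃ e, 2 ≤ e ∧ e * e < number ∧ e ∣ number
  · rw [if_pos ((count_gt_iff number).mpr hP),
        if_pos ((pvAltLoop_iff number 2 le_rfl).mpr hP)]
  · rw [if_neg (fun hc => hP ((count_gt_iff number).mp hc)),
        if_neg (fun hc => hP ((pvAltLoop_iff number 2 le_rfl).mp hc))]
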